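-- pv_equiv track=rewrite | github.com/ShiNera01/Algorithm | 카카오/2018 카카오 블라인드/n진수 게임.py | solution
-- ===== SOURCE A (Python) =====
-- def change(n,number):
--
--     result = ""
--
--     if number < n:
--         if number == 10:
--             result = "A"
--         elif number == 11:
--             result = "B"
--         elif number == 12:
--             result = "C"
--         elif number == 13:
--             result = "D"
--         elif number == 14:
--             result = "E"
--         elif number == 15:
--             result = "F"
--         else:
--             result = str(number)
--
--         return str(result)
--
--     while number >= n:
--         remainder = number % n
--         number = number // n
--
--
--         if remainder == 10:
--             result = "A" + result
--         elif remainder == 11: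
--             result = "B" + result
--         elif remainder == 12:
--             result = "C" + result
--         elif remainder == 13:
--             result = "D" + result
--         elif remainder == 14:
--             result = "E" + result
--         elif remainder == 15:
--             result = "F" + result
--         else:
--             result = str(remainder) + result
--
--     if number == 10:
--         result = "A" + result
--     elif number == 11:
--         result = "B" + result
--     elif number == 12:
--         result = "C" + result
--     elif number == 13:
--         result = "D" + result
--     elif number == 14:
--         result = "E" + result
--     elif number == 15:
--         result = "F" + result
--     else:
--         result = str(number) + result
--
--
--
--     return result
--
-- def solution(n, t, m, p):
--     answer = ''
--
--     array = []
--     index = 0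
--
--     while len(array) <= m * t:
--         number_word = change(n,index)          # m * t 수 까지 숫자 선택하여 해당 진법으로 바꿔줌 change는 str리턴
--         for j in range(len(number_word)):
--             array.append(number_word[j])
--         index += 1
--     array = array[:m*t]
--
--
--     for i in range(m*t):
--         if i % m == p - 1:
--             answer += array[i]
--
--
--
--     return answer
-- ===== SOURCE B (Python) =====
-- def digit(d):
--     return 'ABCDEF'[d - 10] if 10 <= d <= 15 else str(d)
--
-- def change(n, x):
--     return digit(x) if x < n else change(n, x // n) + digit(x % n)
--
-- def solution(n, t, m, p):
--     total = m * t
--     s = ''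
--     i = 0
--     while len(s) < total:
--         s += change(n, i)
--         i += 1
--     return s[:total][p - 1::m]
-- ===== Notes on version B (the rewrite author's own statement) =====
-- stated objective: simpler
-- what changed: the hand-rolled iterative divmod loop with a triplicated 6-way letter if-chain becomes a 3-line recursive base converter with a digit helper, and the char-array plus index-filter selection loop becomes growing one string to length m*t and taking the stride-m slice s[:m*t][p-1::m]
-- outside the precondition, e.g. on solution(2, 3, 2, 4): A returns '', B returns '01'; on solution(5, 3, 0, 1): A returns '', B raises ValueError
import Mathlib
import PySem

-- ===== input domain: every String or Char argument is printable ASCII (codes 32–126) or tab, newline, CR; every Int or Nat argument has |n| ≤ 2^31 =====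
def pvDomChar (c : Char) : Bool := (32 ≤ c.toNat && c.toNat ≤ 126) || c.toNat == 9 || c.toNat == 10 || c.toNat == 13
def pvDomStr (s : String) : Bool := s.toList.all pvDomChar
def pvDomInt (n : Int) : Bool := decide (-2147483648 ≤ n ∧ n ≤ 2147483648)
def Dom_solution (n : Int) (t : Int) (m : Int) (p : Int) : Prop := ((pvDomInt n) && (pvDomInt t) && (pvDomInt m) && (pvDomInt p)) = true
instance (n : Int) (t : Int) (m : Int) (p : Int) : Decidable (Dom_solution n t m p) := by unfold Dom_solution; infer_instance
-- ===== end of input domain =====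

-- B rewrites A's iterative divmod loop (with its triplicated 6-way letter if-chain) as a
-- 3-line recursive base converter, and replaces the char-array + index-filter selection loop
-- by growing one string to length m*t and taking the stride-m slice s[:m*t][p-1::m]; objective: simpler.
-- Python strings are represented as List Char and wrapped with String.ofList at the end.

-- ===== PORT A =====
-- A's 6-way if/elif digit chain (written three times in A's source; identical code each time)
def pvDigitA (k : Int) : List Char :=
  if k = 10 then ['A'] else if k = 11 then ['B'] else if k = 12 then ['C']
  else if k = 13 then ['D'] else if k = 14 then ['E'] else if k = 15 then ['F']
  else PySem.Int.toChars k

-- A's 'while number >= n' loop; fuel makes it total (number.toNat + 1 suffices whenever n ≥ 2, 0 ≤ number)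
def pvChangeLoopA (n : Int) : Nat → Int → List Char → Int × List Char
  | 0, number, result => (number, result)
  | fuel+1, number, result =>
    if n ≤ number then
      pvChangeLoopA n fuel (PySem.Int.floordiv number n)
        (pvDigitA (PySem.Int.mod number n) ++ result)
    else (number, result)

def pvChangeA (n : Int) (number : Int) : List Char :=
  if number < n then pvDigitA number
  else
    let r := pvChangeLoopA n (number.toNat + 1) number []
    pvDigitA r.1 ++ r.2

-- A's 'while len(array) <= m*t' loop (the inner for-loop appends every char of the word)
def pvBuildA (n : Int) (total : Int) : Nat → List Char → Int → List Char
  | 0, array, _ => array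
  | fuel+1, array, index =>
    if (array.length : Int) ≤ total then
      pvBuildA n total fuel (array ++ pvChangeA n index) (index + 1)
    else array

def solution (n : Int) (t : Int) (m : Int) (p : Int) : String :=
  let array0 := pvBuildA n (m * t) ((m * t).toNat + 1) [] 0
  let array := PySem.List.slice array0 none (some (m * t))
  String.ofList
    ((PySem.List.pyRange 0 (m * t) 1).foldl
      (fun answer i =>
        if PySem.Int.mod i m = p - 1 then answer ++ [PySem.List.pyGetD array i ' ']
        else answer)
      [])

-- ===== PORT B =====
-- digit(d) = 'ABCDEF'[d-10] if 10 <= d <= 15 else str(d)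
def pvDigitB (d : Int) : List Char :=
  if 10 ≤ d ∧ d ≤ 15 then
    match PySem.List.pyGet? ['A', 'B', 'C', 'D', 'E', 'F'] (d - 10) with
    | some c => [c]
    | none => []          -- unreachable under the guard
  else PySem.Int.toChars d

-- change(n, x) = digit(x) if x < n else change(n, x // n) + digit(x % n); fuel x.toNat + 1 suffices for n ≥ 2, 0 ≤ x
def pvChangeB (n : Int) : Nat → Int → List Char
  | 0, _ => []
  | fuel+1, x =>
    if x < n then pvDigitB x
    else pvChangeB n fuel (PySem.Int.floordiv x n) ++ pvDigitB (PySem.Int.mod x n)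

-- while len(s) < total: s += change(n, i); i += 1
def pvGrowB (n : Int) (total : Int) : Nat → List Char → Int → List Char
  | 0, s, _ => s
  | fuel+1, s, i =>
    if (s.length : Int) < total then
      pvGrowB n total fuel (s ++ pvChangeB n (i.toNat + 1) i) (i + 1)
    else s

def solution_alt (n : Int) (t : Int) (m : Int) (p : Int) : String :=
  let total := m * t
  let s := pvGrowB n total (total.toNat + 1) [] 0
  String.ofList
    ((PySem.List.slice? (PySem.List.slice s none (some total)) (some (p - 1)) none m).getD [])

-- ===== PRECONDITION & SPEC =====
-- Pre_ excludes inputs where A raises or diverges (n ≤ 1 with m*t ≥ 1; n ≤ 0 with m*t = 0; m = 0 with t = 0,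
-- where B's stride-0 slice raises ValueError), and the out-of-range player index p ∉ [1, m] in the main
-- region, where A's filter matches nothing and returns '' while B's Python slice wraps a negative start.
def Pre_solution (n : Int) (t : Int) (m : Int) (p : Int) : Prop :=
  (m * t < 0) ∨ (t = 0 ∧ m ≠ 0 ∧ 1 ≤ n) ∨ (2 ≤ n ∧ 1 ≤ m ∧ 1 ≤ t ∧ 1 ≤ p ∧ p ≤ m)
instance (n : Int) (t : Int) (m : Int) (p : Int) : Decidable (Pre_solution n t m p) := by
  unfold Pre_solution; infer_instance

def pvWitness_solution : Int × Int × Int × Int := (2, 2, 2, 1)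

def Spec_solution (n : Int) (t : Int) (m : Int) (p : Int) (out : String) : Prop := out = solution_alt n t m p
instance (n : Int) (t : Int) (m : Int) (p : Int) (out : String) : Decidable (Spec_solution n t m p out) := by unfold Spec_solution; infer_instance

-- ===== CLAIM (what is proved, stated in full; the proofs are below) =====
def Claim_equal_solution : Prop := ∀ (n : Int) (t : Int) (m : Int) (p : Int), Dom_solution n t m p → Pre_solution n t m p → Spec_solution n t m p (solution n t m p)

-- ===== LEMMAS AND PROOFS =====

-- the two digit helpers agree on every integer
theorem pvDigit_eq (k : Int) : pvDigitA k = pvDigitB k := by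
  by_cases h : 10 ≤ k ∧ k ≤ 15
  · obtain ⟨h1, h2⟩ := h
    interval_cases k <;> decide
  · have h10 : k ≠ 10 := by omega
    have h11 : k ≠ 11 := by omega
    have h12 : k ≠ 12 := by omega
    have h13 : k ≠ 13 := by omega
    have h14 : k ≠ 14 := by omega
    have h15 : k ≠ 15 := by omega
    simp [pvDigitA, pvDigitB, h, h10, h11, h12, h13, h14, h15]

-- B's change is fuel-indifferent once the fuel exceeds x.toNat
-- arithmetic facts about Python's floor division used by the termination arguments
theorem pvFdiv_facts (n x : Int) (hn : 2 ≤ n) (hxn : n ≤ x) :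
    0 ≤ PySem.Int.floordiv x n ∧ (PySem.Int.floordiv x n).toNat < x.toNat := by
  have hfd : PySem.Int.floordiv x n = x / n := by
    simp [PySem.Int.floordiv, Int.fdiv_eq_ediv, if_pos (Or.inl (by omega : (0:Int) ≤ n))]
  have hge : 0 ≤ x / n := Int.ediv_nonneg (by omega) (by omega)
  have hlt : x / n < x := by
    rw [Int.ediv_lt_iff_lt_mul (by omega)]
    nlinarith
  refine ⟨hfd ▸ hge, ?_⟩
  rw [hfd]
  omega

theorem pvFmod_nonneg (n x : Int) (hn : 2 ≤ n) : 0 ≤ PySem.Int.mod x n := by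
  have : PySem.Int.mod x n = x % n + 0 := by
    simp [PySem.Int.mod, Int.fmod_eq_emod, if_pos (Or.inl (by omega : (0:Int) ≤ n))]
  rw [this, add_zero]
  exact Int.emod_nonneg x (by omega)

theorem pvChangeB_fuel (n : Int) (hn : 2 ≤ n) :
    ∀ (x : Int), 0 ≤ x → ∀ (f g : Nat), x.toNat < f → x.toNat < g →
    pvChangeB n f x = pvChangeB n g x := by
  suffices H : ∀ (N : Nat) (x : Int), x.toNat = N → 0 ≤ x → ∀ (f g : Nat), x.toNat < f → x.toNat < g →
      pvChangeB n f x = pvChangeB n g x by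
    exact fun x hx f g hf hg => H x.toNat x rfl hx f g hf hg
  intro N
  induction N using Nat.strong_induction_on with
  | _ N ih =>
    rintro x rfl hx f g hf hg
    obtain ⟨f', rfl⟩ : ∃ f', f = f' + 1 := ⟨f - 1, by omega⟩
    obtain ⟨g', rfl⟩ : ∃ g', g = g' + 1 := ⟨g - 1, by omega⟩
    by_cases hxn : x < n
    · simp [pvChangeB, hxn]
    · have hnx : n ≤ x := by omega
      obtain ⟨h0, hlt⟩ := pvFdiv_facts n x hn hnx
      simp only [pvChangeB, if_neg hxn]
      congr 1
      exact ih (PySem.Int.floordiv x n).toNat (by omega) _ rfl h0 f' g' (by omega) (by omega)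

-- A's digit-peeling loop computes B's recursion
theorem pvChangeLoopA_spec (n : Int) (hn : 2 ≤ n) :
    ∀ (x : Int), 0 ≤ x → ∀ (fuel : Nat) (res : List Char), x.toNat < fuel →
    pvDigitA (pvChangeLoopA n fuel x res).1 ++ (pvChangeLoopA n fuel x res).2
      = pvChangeB n (x.toNat + 1) x ++ res := by
  suffices H : ∀ (N : Nat) (x : Int), x.toNat = N → 0 ≤ x → ∀ (fuel : Nat) (res : List Char), x.toNat < fuel →
      pvDigitA (pvChangeLoopA n fuel x res).1 ++ (pvChangeLoopA n fuel x res).2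
        = pvChangeB n (x.toNat + 1) x ++ res by
    exact fun x hx fuel res hf => H x.toNat x rfl hx fuel res hf
  intro N
  induction N using Nat.strong_induction_on with
  | _ N ih =>
    rintro x rfl hx fuel res hf
    obtain ⟨f', rfl⟩ : ∃ f', fuel = f' + 1 := ⟨fuel - 1, by omega⟩
    by_cases hxn : x < n
    · simp [pvChangeLoopA, pvChangeB, not_le.mpr hxn, hxn, pvDigit_eq]
    · have hnx : n ≤ x := by omega
      obtain ⟨h0, hlt⟩ := pvFdiv_facts n x hn hnx
      have hstep : pvChangeLoopA n (f' + 1) x res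
          = pvChangeLoopA n f' (PySem.Int.floordiv x n) (pvDigitA (PySem.Int.mod x n) ++ res) := by
        simp [pvChangeLoopA, hnx]
      rw [hstep,
        ih (PySem.Int.floordiv x n).toNat (by omega) _ rfl h0 f' _ (by omega)]
      have hrhs : pvChangeB n (x.toNat + 1) x
          = pvChangeB n x.toNat (PySem.Int.floordiv x n) ++ pvDigitB (PySem.Int.mod x n) := by
        simp only [pvChangeB, if_neg hxn]
      rw [hrhs, pvChangeB_fuel n hn (PySem.Int.floordiv x n) h0 x.toNat
        ((PySem.Int.floordiv x n).toNat + 1) (by omega) (by omega)]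
      simp [pvDigit_eq, List.append_assoc]

theorem pvChangeA_eq (n : Int) (hn : 2 ≤ n) (x : Int) (hx : 0 ≤ x) :
    pvChangeA n x = pvChangeB n (x.toNat + 1) x := by
  by_cases hxn : x < n
  · simp [pvChangeA, pvChangeB, hxn, pvDigit_eq]
  · simp only [pvChangeA, if_neg hxn]
    have := pvChangeLoopA_spec n hn x hx (x.toNat + 1) [] (by omega)
    simpa using this

theorem pvDigitB_ne_nil (d : Int) (hd : 0 ≤ d) : pvDigitB d ≠ [] := by
  by_cases h : 10 ≤ d ∧ d ≤ 15
  · obtain ⟨h1, h2⟩ := h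
    interval_cases d <;> decide
  · simp only [pvDigitB, if_neg h, PySem.Int.toChars, if_neg (not_lt.mpr hd)]
    exact List.ne_nil_of_length_pos Nat.length_toDigits_pos

theorem pvChangeB_ne_nil (n : Int) (hn : 2 ≤ n) (x : Int) (hx : 0 ≤ x) :
    pvChangeB n (x.toNat + 1) x ≠ [] := by
  by_cases hxn : x < n
  · simpa [pvChangeB, hxn] using pvDigitB_ne_nil x hx
  · simp only [pvChangeB, if_neg hxn]
    intro hcon
    rw [List.append_eq_nil_iff] at hcon
    exact pvDigitB_ne_nil (PySem.Int.mod x n) (pvFmod_nonneg n x hn) hcon.2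

theorem pvBuildA_prefix (n total : Int) :
    ∀ (fuel : Nat) (acc : List Char) (idx : Int), acc <+: pvBuildA n total fuel acc idx := by
  intro fuel
  induction fuel with
  | zero => intro acc idx; exact List.prefix_refl acc
  | succ f ih =>
    intro acc idx
    by_cases h : (acc.length : Int) ≤ total
    · simp only [pvBuildA, if_pos h]
      exact (List.prefix_append acc (pvChangeA n idx)).trans (ih _ _)
    · simp [pvBuildA, h]

theorem pvBuildA_len (n total : Int) (hn : 2 ≤ n) :
    ∀ (fuel : Nat) (acc : List Char) (idx : Int), 0 ≤ idx →
    total.toNat < fuel + acc.length → total < ((pvBuildA n total fuel acc idx).length : Int) := by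
  intro fuel
  induction fuel with
  | zero =>
    intro acc idx _ hlen
    simp only [pvBuildA]
    omega
  | succ f ih =>
    intro acc idx hidx hlen
    by_cases h : (acc.length : Int) ≤ total
    · simp only [pvBuildA, if_pos h]
      have hw : pvChangeA n idx ≠ [] := by
        rw [pvChangeA_eq n hn idx hidx]
        exact pvChangeB_ne_nil n hn idx hidx
      have : 1 ≤ (pvChangeA n idx).length := List.length_pos_of_ne_nil hw
      exact ih _ (idx + 1) (by omega) (by simp [List.length_append]; omega)
    · simp only [pvBuildA, if_neg h]
      omega

theorem pvBuild_take (n total : Int) (hn : 2 ≤ n) :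
    ∀ (fuel : Nat) (acc : List Char) (idx : Int), 0 ≤ idx →
    total.toNat < fuel + acc.length →
    (pvBuildA n total fuel acc idx).take total.toNat
      = (pvGrowB n total fuel acc idx).take total.toNat := by
  intro fuel
  induction fuel with
  | zero => intro acc idx _ _; rfl
  | succ f ih =>
    intro acc idx hidx hlen
    have hw : pvChangeA n idx = pvChangeB n (idx.toNat + 1) idx := pvChangeA_eq n hn idx hidx
    have hwne : pvChangeA n idx ≠ [] := hw ▸ pvChangeB_ne_nil n hn idx hidx
    have hw1 : 1 ≤ (pvChangeA n idx).length := List.length_pos_of_ne_nil hwne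
    rcases lt_trichotomy ((acc.length : Int)) total with hlt | heq | hgt
    · have hle : (acc.length : Int) ≤ total := le_of_lt hlt
      simp only [pvBuildA, pvGrowB, if_pos hle, if_pos hlt, ← hw]
      exact ih _ (idx + 1) (by omega) (by simp [List.length_append]; omega)
    · have hnlt : ¬ ((acc.length : Int) < total) := by omega
      simp only [pvBuildA, pvGrowB, if_pos (le_of_eq heq), if_neg hnlt]
      have hacc : acc <+: pvBuildA n total f (acc ++ pvChangeA n idx) (idx + 1) :=
        (List.prefix_append acc (pvChangeA n idx)).trans (pvBuildA_prefix n total f _ _)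
      obtain ⟨rest, hres⟩ := hacc
      have hT : total.toNat = acc.length := by omega
      rw [← hres, hT]
      simp
    · simp only [pvBuildA, pvGrowB, if_neg (by omega : ¬ ((acc.length : Int) ≤ total)),
        if_neg (by omega : ¬ ((acc.length : Int) < total))]

-- fold-with-if as filter + map (Prop-valued test)
theorem pvFoldl_if_append {α β : Type} (P : α → Prop) [DecidablePred P] (f : α → β) :
    ∀ (l : List α) (acc : List β),
    l.foldl (fun a x => if P x then a ++ [f x] else a) acc
      = acc ++ (l.filter (fun x => decide (P x))).map f := by
  intro l
  induction l with
  | nil => intro acc; simp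
  | cons x l ih =>
    intro acc
    by_cases h : P x
    · simp [List.foldl_cons, h, ih]
    · simp [List.foldl_cons, h, ih]

-- Python's % with a positive divisor is Lean's emod
theorem pvMod_pos_eq (m : Int) (hm : 0 < m) (i : Int) : PySem.Int.mod i m = i % m := by
  unfold PySem.Int.mod
  rw [Int.fmod_eq_emod, if_pos (Or.inl hm.le), add_zero]

-- a stride index below the ceiling-count stays below the bound
theorem pvStride_lt (T q m : Int) (hm : 0 < m) (k : Nat)
    (hk : (k : Int) < (T - q + m - 1) / m) : q + m * (k : Int) < T := by
  have h2 : ((k : Int) + 1) * m ≤ T - q + m - 1 :=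
    (Int.le_ediv_iff_mul_le hm).mp (Int.lt_iff_add_one_le.mp hk)
  nlinarith

-- the indices A's filter selects are exactly the stride-m indices B's slice takes
theorem pvIdx_eq (m q : Int) (hm : 0 < m) (hq0 : 0 ≤ q) (hqm : q < m) (T : Nat) :
    ((PySem.List.pyRange 0 (T : Int) 1).filter (fun i => decide (PySem.Int.mod i m = q)))
      = (List.range (if q < (T : Int) then (((T : Int) - q + m - 1) / m).toNat else 0)).map
          (fun (k : Nat) => q + m * (k : Int)) := by
  have hmem : ∀ x : Int,
      x ∈ (PySem.List.pyRange 0 (T : Int) 1).filter (fun i => decide (PySem.Int.mod i m = q)) ↔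
      x ∈ (List.range (if q < (T : Int) then (((T : Int) - q + m - 1) / m).toNat else 0)).map
          (fun (k : Nat) => q + m * (k : Int)) := by
    intro x
    simp only [List.mem_filter, PySem.List.mem_pyRange_one, decide_eq_true_eq, List.mem_map,
      List.mem_range, pvMod_pos_eq m hm]
    constructor
    · rintro ⟨⟨hx0, hxT⟩, hmod⟩
      have hj0 : 0 ≤ x / m := Int.ediv_nonneg hx0 hm.le
      have hxeq : m * (x / m) + q = x := by rw [← hmod]; exact Int.ediv_add_emod x m
      have hmj : 0 ≤ m * (x / m) := mul_nonneg hm.le hj0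
      have hqT : q < (T : Int) := by omega
      have hD0 : 0 ≤ ((T : Int) - q + m - 1) / m := Int.ediv_nonneg (by omega) hm.le
      have hdiv : x / m < ((T : Int) - q + m - 1) / m := by
        rw [Int.lt_iff_add_one_le, Int.le_ediv_iff_mul_le hm]
        nlinarith
      refine ⟨(x / m).toNat, ?_, ?_⟩
      · rw [if_pos hqT]; omega
      · rw [Int.toNat_of_nonneg hj0]; linarith [hxeq]
    · rintro ⟨k, hk, rfl⟩
      by_cases hqT : q < (T : Int)
      · rw [if_pos hqT] at hk
        have hkD : (k : Int) < ((T : Int) - q + m - 1) / m := Int.lt_toNat.mp hk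
        have hlt : q + m * (k : Int) < (T : Int) := pvStride_lt (T : Int) q m hm k hkD
        have hmk : 0 ≤ m * (k : Int) := mul_nonneg hm.le (by positivity)
        refine ⟨⟨by omega, hlt⟩, ?_⟩
        rw [Int.add_mul_emod_self_left, Int.emod_eq_of_lt hq0 hqm]
      · rw [if_neg hqT] at hk; omega
  have pw1 : ((PySem.List.pyRange 0 (T : Int) 1).filter
      (fun i => decide (PySem.Int.mod i m = q))).Pairwise (· < ·) :=
    (PySem.List.pairwise_lt_pyRange_one 0 (T : Int)).filter _
  have pw2 : (((List.range (if q < (T : Int) then (((T : Int) - q + m - 1) / m).toNat else 0)).map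
      (fun (k : Nat) => q + m * (k : Int)))).Pairwise (· < ·) := by
    rw [List.pairwise_map]
    exact List.pairwise_lt_range.imp (fun {a b} h => by
      have : (a : Int) < (b : Int) := by exact_mod_cast h
      nlinarith)
  exact List.eq_of_perm_of_sorted (fun a b _ _ h1 h2 => absurd h1 (asymm h2)) pw1 pw2
    ((List.perm_ext_iff_of_nodup pw1.nodup pw2.nodup).mpr hmem)

-- B's extended slice with nonnegative start and positive step, in closed form
theorem pvSliceQ_pos (L : List Char) (q m : Int) (hm : 0 < m) (hq0 : 0 ≤ q) :
    PySem.List.slice? L (some q) none m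
      = some ((List.range (if q < (L.length : Int) then (((L.length : Int) - q + m - 1) / m).toNat else 0)).filterMap
          (fun (k : Nat) => L[(q + m * (k : Int)).toNat]?)) := by
  unfold PySem.List.slice? PySem.List.sliceIndices
  rw [if_neg hm.ne']
  dsimp only
  simp only [if_neg (not_lt.mpr hm.le), if_neg (not_lt.mpr hq0), if_pos hm]
  by_cases hqL : q < (L.length : Int)
  · simp [min_eq_left hqL.le, hqL]
  · simp [min_eq_right (not_lt.mp hqL), hqL]

-- A's selection foldl equals B's extended slice on any list
theorem pvSel_eq (m q : Int) (hm : 0 < m) (hq0 : 0 ≤ q) (hqm : q < m) (L : List Char) (d : Char) :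
    (PySem.List.pyRange 0 (L.length : Int) 1).foldl
        (fun ans i => if PySem.Int.mod i m = q then ans ++ [PySem.List.pyGetD L i d] else ans) []
      = (PySem.List.slice? L (some q) none m).getD [] := by
  rw [pvFoldl_if_append (fun i => PySem.Int.mod i m = q) (fun i => PySem.List.pyGetD L i d)
      (PySem.List.pyRange 0 (L.length : Int) 1) [], List.nil_append,
    pvIdx_eq m q hm hq0 hqm L.length, pvSliceQ_pos L q m hm hq0, Option.getD_some, List.map_map]
  by_cases hqL : q < (L.length : Int)
  · rw [if_pos hqL]
    refine ((List.filterMap_congr (g := fun (k : Nat) =>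
        some ((fun i => PySem.List.pyGetD L i d) (q + m * (k : Int)))) ?_).trans ?_).symm
    · intro k hk
      rw [List.mem_range] at hk
      have hkD : (k : Int) < ((L.length : Int) - q + m - 1) / m := Int.lt_toNat.mp hk
      have hlt : q + m * (k : Int) < (L.length : Int) := pvStride_lt _ q m hm k hkD
      have hge : 0 ≤ q + m * (k : Int) := by positivity
      have hnat : (q + m * (k : Int)).toNat < L.length := by omega
      rw [List.getElem?_eq_getElem hnat]
      show some L[(q + m * (k : Int)).toNat] = some (PySem.List.pyGetD L (q + m * (k : Int)) d)
      rw [PySem.List.pyGetD_eq_getElem L d hge (by omega)]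
    · exact congrFun (List.filterMap_eq_map
        (f := fun (k : Nat) => (fun i => PySem.List.pyGetD L i d) (q + m * (k : Int)))) _
  · rw [if_neg hqL]
    simp

theorem pvSliceQ_nil {α : Type} (a b : Option Int) (st : Int) (hst : st ≠ 0) :
    PySem.List.slice? ([] : List α) a b st = some [] := by
  unfold PySem.List.slice?
  rw [if_neg hst]
  simp

-- ===== VERDICT (by name: the statement is the Claim_ definition above) =====
theorem solution_spec : Claim_equal_solution := by
  unfold Claim_equal_solution
  intro n t m p _ hpre
  unfold Spec_solution
  simp only [solution, solution_alt]
  rcases hpre with hneg | ⟨ht0, hm0, hn1⟩ | ⟨hn, hm, ht, hp1, hpm⟩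
  · -- m * t < 0 : both loops never run, the selection range is empty on both sides
    have hmne : m ≠ 0 := by rintro rfl; simp at hneg
    have hz : (m * t).toNat = 0 := by omega
    rw [hz,
      show pvBuildA n (m * t) (0 + 1) [] 0 = [] from by
        simp only [pvBuildA]
        rw [if_neg (by simpa using not_le.mpr hneg)],
      show pvGrowB n (m * t) (0 + 1) [] 0 = [] from by
        simp only [pvGrowB]
        rw [if_neg (by simp; omega)],
      PySem.List.pyRange_one_eq_nil hneg.le,
      show PySem.List.slice ([] : List Char) none (some (m * t)) = [] from by
        simp [PySem.List.slice],
      pvSliceQ_nil _ _ m hmne]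
    simp
  · -- t = 0 : A converts one word and throws it away; both return the empty string
    subst ht0
    simp only [mul_zero, Int.toNat_zero]
    rw [show pvGrowB n 0 (0 + 1) [] 0 = [] from by simp [pvGrowB],
      show pvBuildA n 0 (0 + 1) [] 0 = [] ++ pvChangeA n 0 from by simp [pvBuildA],
      PySem.List.slice_to _ le_rfl, PySem.List.slice_to _ le_rfl,
      PySem.List.pyRange_one_eq_nil le_rfl]
    simp [pvSliceQ_nil _ _ m hm0]
  · -- main region
    have htot0 : 0 < m * t := mul_pos (by omega) (by omega)
    have harr_len := pvBuildA_len n (m * t) hn ((m * t).toNat + 1) [] 0 le_rfl (by simp)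
    have htake := pvBuild_take n (m * t) hn ((m * t).toNat + 1) [] 0 le_rfl (by simp)
    rw [PySem.List.slice_to _ htot0.le, PySem.List.slice_to _ htot0.le, ← htake]
    set L := (pvBuildA n (m * t) ((m * t).toNat + 1) [] 0).take (m * t).toNat with hL
    have hLlen : (L.length : Int) = m * t := by
      rw [hL]
      simp only [List.length_take]
      omega
    rw [show m * t = (L.length : Int) from hLlen.symm]
    exact congrArg String.ofList (pvSel_eq m (p - 1) (by omega) (by omega) (by omega) L ' ')
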